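-- pv_equiv track=rewrite | github.com/robynlgy/problem-solving | LeetCode/eb OA.py | concatEdgeLetters
-- ===== SOURCE A (Python) =====
-- def concatEdgeLetters(a):
--     res = []
--
--     for i in range(len(a)):
--         if i<len(a)-1:
--             str = a[i][0]+a[i+1][-1]
--         else:
--             str = a[i][0]+a[0][-1]
--         res.append(str)
--     return res
-- ===== SOURCE B (Python) =====
-- def concatEdgeLetters(a):
--     if not a:
--         return []
--     nxt = a[1:] + a[:1]
--     return [w[0] + n[-1] for w, n in zip(a, nxt)]
-- ===== Notes on version B (the rewrite author's own statement) =====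
-- stated objective: idiomatic
-- what changed: Replaces the index loop with its wraparound branch by rotating the list (a[1:]+a[:1]) and mapping w[0]+n[-1] over zip(a, nxt), eliminating all index arithmetic and the boundary conditional.
import Mathlib
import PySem

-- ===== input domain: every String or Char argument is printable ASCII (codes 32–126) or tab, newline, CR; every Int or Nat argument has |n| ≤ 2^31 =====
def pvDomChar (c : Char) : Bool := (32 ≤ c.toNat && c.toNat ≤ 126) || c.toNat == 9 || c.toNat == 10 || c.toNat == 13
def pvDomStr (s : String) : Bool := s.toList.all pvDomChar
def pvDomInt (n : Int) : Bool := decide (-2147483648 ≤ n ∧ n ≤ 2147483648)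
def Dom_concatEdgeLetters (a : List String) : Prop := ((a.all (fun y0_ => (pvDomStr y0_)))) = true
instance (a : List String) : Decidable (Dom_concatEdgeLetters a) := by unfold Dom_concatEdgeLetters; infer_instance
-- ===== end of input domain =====

-- B rotates the list and zips instead of indexing with a wraparound branch; the two-char value w[0]+n[-1] itself is the same expression in both Pythons, shared here as pvGlue.
-- pvGlue w v = w[0] + v[-1]; the ' ' defaults are unreachable under Pre_ (nonempty strings)
def pvGlue (w v : String) : String :=
  String.ofList [((PySem.Str.pyGet? w 0).getD ' '), ((PySem.Str.pyGet? v (-1)).getD ' ')]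

-- ===== PORT A =====
def concatEdgeLetters (a : List String) : List String :=
  (PySem.List.pyRange 0 (a.length : Int) 1).foldl
    (fun res i =>
      res ++ [ if i < (a.length : Int) - 1 then
                 pvGlue (PySem.List.pyGetD a i "") (PySem.List.pyGetD a (i+1) "")
               else
                 pvGlue (PySem.List.pyGetD a i "") (PySem.List.pyGetD a 0 "") ])
    []

-- ===== PORT B =====
def concatEdgeLetters_alt (a : List String) : List String :=
  match a with
  | [] => []
  | x :: xs =>
    let nxt := PySem.List.slice (x :: xs) (some 1) none ++ PySem.List.slice (x :: xs) none (some 1)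
    ((x :: xs).zip nxt).map (fun p => pvGlue p.1 p.2)

-- ===== PRECONDITION & SPEC =====
-- Pre_ excludes lists containing an empty string, on which the Python A raises IndexError at s[0]/s[-1].
def Pre_concatEdgeLetters (a : List String) : Prop := ∀ s ∈ a, s ≠ ""
instance (a : List String) : Decidable (Pre_concatEdgeLetters a) := by unfold Pre_concatEdgeLetters; infer_instance
def pvWitness_concatEdgeLetters : List String := ["ab", "cd", "ef"]
def Spec_concatEdgeLetters (a : List String) (out : List String) : Prop := out = concatEdgeLetters_alt a
instance (a : List String) (out : List String) : Decidable (Spec_concatEdgeLetters a out) := by unfold Spec_concatEdgeLetters; infer_instance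

-- ===== CLAIM (what is proved, stated in full; the proofs are below) =====
def Claim_equal_concatEdgeLetters : Prop := ∀ (a : List String), Dom_concatEdgeLetters a → Pre_concatEdgeLetters a → Spec_concatEdgeLetters a (concatEdgeLetters a)

-- ===== LEMMAS AND PROOFS =====

theorem pv_main (a : List String) : concatEdgeLetters a = concatEdgeLetters_alt a := by
  match a with
  | [] => rfl
  | x :: xs =>
    unfold concatEdgeLetters
    have halt : concatEdgeLetters_alt (x :: xs) =
        ((x :: xs).zip (xs ++ [x])).map (fun p => pvGlue p.1 p.2) := by
      simp only [concatEdgeLetters_alt]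
      rw [PySem.List.slice_from _ (by norm_num), PySem.List.slice_to _ (by norm_num)]
      rfl
    rw [halt]
    rw [PySem.List.foldl_append_singleton_eq_map, PySem.List.pyRange_zero_natCast]
    simp only [List.map_map, List.nil_append]
    apply List.ext_getElem
    · simp
    · intro i h1 h2
      simp only [List.getElem_map, List.getElem_range, Function.comp_apply, List.getElem_zip]
      simp only [List.length_map, List.length_range] at h1
      by_cases hi : i < xs.length
      · rw [if_pos (by simp only [List.length_cons]; push_cast; omega)]
        have hc : (i : Int) + 1 = ((i+1 : Nat) : Int) := by push_cast; ring
        rw [hc, PySem.List.pyGetD_natCast, PySem.List.pyGetD_natCast]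
        congr 1
        · simp [List.getD_eq_getElem?_getD, List.getElem?_eq_getElem h1]
        · simp [List.getD_eq_getElem?_getD,
                List.getElem?_eq_getElem (show i+1 < (x::xs).length by simp; omega),
                List.getElem_append_left hi]
      · have h1' : i < xs.length + 1 := by simpa using h1
        have hieq : i = xs.length := by omega
        subst hieq
        rw [if_neg (by simp only [List.length_cons]; push_cast; omega)]
        rw [PySem.List.pyGetD_natCast]
        congr 1
        · simp [List.getD_eq_getElem?_getD]
          try rfl
        · simp [PySem.List.pyGetD_zero_cons]


-- ===== VERDICT (by name: the statement is the Claim_ definition above) =====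
theorem concatEdgeLetters_spec : Claim_equal_concatEdgeLetters := by
  intro a _ _
  unfold Spec_concatEdgeLetters
  exact pv_main a
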